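-- pv_equiv track=rewrite | github.com/cvmfs-contrib/cvmfs-catalog-visualizations | async_tree_builder.py | _get_path_segments
-- ===== SOURCE A (Python) =====
-- from typing import Callable, List, Optional
--
-- def _get_path_segments(parent_path: str, child_path: str) -> List[str]:
--     """Get the intermediate path segments between parent and child."""
--     if parent_path == "/":
--         parent_path = ""
--
--     if not child_path.startswith(parent_path):
--         return [child_path]
--
--     relative = child_path[len(parent_path):]
--     if relative.startswith("/"):
--         relative = relative[1:]
--
--     parts = relative.split("/")
--     segments = []
--     current = parent_path
--
--     for part in parts:
--         current = current + "/" + part if current else "/" + part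
--         segments.append(current)
--
--     return segments
-- ===== SOURCE B (Python) =====
-- from typing import List
--
-- def _get_path_segments(parent_path: str, child_path: str) -> List[str]:
--     """Get the intermediate path segments between parent and child."""
--     if parent_path == "/":
--         parent_path = ""
--
--     if not child_path.startswith(parent_path):
--         return [child_path]
--
--     relative = child_path[len(parent_path):]
--     if relative.startswith("/"):
--         relative = relative[1:]
--
--     # One segment per '/' position in `relative` (the prefix ending there),
--     # plus the full path; each prefix is recomputed independently.
--     segments = [parent_path + "/" + relative[:i]
--                 for i, ch in enumerate(relative) if ch == "/"]
--     segments.append(parent_path + "/" + relative)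
--     return segments
-- ===== Notes on version B (the rewrite author's own statement) =====
-- stated objective: alternative
-- what changed: Instead of splitting `relative` on '/' and extending a running `current` string part by part, B scans the characters of `relative` once and, at each '/' position i, independently recomputes the segment as parent_path + '/' + relative[:i], appending the full path last; no split() and no threaded accumulator.
import Mathlib
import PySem

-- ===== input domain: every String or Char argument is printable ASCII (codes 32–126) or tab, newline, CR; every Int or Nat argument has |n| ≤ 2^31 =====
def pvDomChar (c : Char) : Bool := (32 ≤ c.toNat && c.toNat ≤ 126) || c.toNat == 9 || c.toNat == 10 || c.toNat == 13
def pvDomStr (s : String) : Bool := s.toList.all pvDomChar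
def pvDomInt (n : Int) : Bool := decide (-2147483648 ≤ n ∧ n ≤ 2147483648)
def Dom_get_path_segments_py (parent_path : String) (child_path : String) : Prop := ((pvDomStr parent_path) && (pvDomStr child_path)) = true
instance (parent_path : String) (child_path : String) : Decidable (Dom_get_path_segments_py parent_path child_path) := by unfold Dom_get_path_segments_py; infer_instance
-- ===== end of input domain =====

-- B replaces A's running-accumulator loop over relative.split("/") by emitting, for each '/'
-- position in `relative`, the independently recomputed prefix parent + "/" + relative[:i]
-- (plus the full path); objective: alternative decomposition, no split and no threaded state.

-- ===== PORT A =====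
def get_path_segments_py (parent_path : String) (child_path : String) : List String :=
  let parent_path := if parent_path = "/" then "" else parent_path
  if !(PySem.Str.startswith child_path parent_path) then [child_path]
  else
    let relative := PySem.Str.slice child_path (some (PySem.Str.len parent_path)) none
    let relative := if PySem.Str.startswith relative "/" then PySem.Str.slice relative (some 1) none else relative
    -- relative.split("/"): separator is the nonempty literal "/", PySem.Chars.splitOn is exact here
    let parts := (PySem.Chars.splitOn relative.toList ['/']).map String.ofList
    let st := parts.foldl (fun (st : String × List String) part =>
      let current := if st.1 ≠ "" then st.1 ++ "/" ++ part else "/" ++ part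
      (current, st.2 ++ [current])) (parent_path, [])
    st.2

-- ===== PORT B =====
def get_path_segments_py_alt (parent_path : String) (child_path : String) : List String :=
  let parent_path := if parent_path = "/" then "" else parent_path
  if !(PySem.Str.startswith child_path parent_path) then [child_path]
  else
    let relative := PySem.Str.slice child_path (some (PySem.Str.len parent_path)) none
    let relative := if PySem.Str.startswith relative "/" then PySem.Str.slice relative (some 1) none else relative
    -- [parent + "/" + relative[:i] for i, ch in enumerate(relative) if ch == "/"]
    let segments := (PySem.List.enumerate relative.toList).filterMap
      (fun p => if p.2 = '/' then some (parent_path ++ "/" ++ PySem.Str.slice relative none (some p.1)) else none)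
    segments ++ [parent_path ++ "/" ++ relative]

-- ===== PRECONDITION & SPEC =====
def Spec_get_path_segments_py (parent_path : String) (child_path : String) (out : List String) : Prop := out = get_path_segments_py_alt parent_path child_path
instance (parent_path : String) (child_path : String) (out : List String) : Decidable (Spec_get_path_segments_py parent_path child_path out) := by unfold Spec_get_path_segments_py; infer_instance

-- ===== CLAIM (what is proved, stated in full; the proofs are below) =====
def Claim_equal_get_path_segments_py : Prop := ∀ (parent_path : String) (child_path : String), Dom_get_path_segments_py parent_path child_path → Spec_get_path_segments_py parent_path child_path (get_path_segments_py parent_path child_path)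

-- ===== LEMMAS AND PROOFS =====

-- split of a char list on '/' (accumulator `cur` holds the current piece, reversed)
def pvPartsAux : List Char → List Char → List (List Char)
  | cur, [] => [cur.reverse]
  | cur, c :: rest => if c = '/' then cur.reverse :: pvPartsAux [] rest else pvPartsAux (c :: cur) rest

-- prefixes of a char list ending just before each '/'
def pvSlashCuts : List Char → List (List Char)
  | [] => []
  | c :: cs => (if c = '/' then [[]] else []) ++ (pvSlashCuts cs).map (c :: ·)

-- running joins: [p₁, p₁ ++ '/' ++ p₂, …]
def pvPrefixJoins : List (List Char) → List (List Char)
  | [] => []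
  | p :: ps => p :: (pvPrefixJoins ps).map (fun q => p ++ '/' :: q)

theorem pvGo_eq : ∀ (fuel : Nat) (l cur : List Char) (acc : List (List Char)), l.length < fuel →
    PySem.Chars.splitOn.go ['/'] fuel l cur acc = acc.reverse ++ pvPartsAux cur l := by
  intro fuel
  induction fuel with
  | zero => intro l cur acc h; omega
  | succ f ih =>
    intro l cur acc h
    cases l with
    | nil => simp [PySem.Chars.splitOn.go, pvPartsAux]
    | cons c rest =>
      by_cases hc : c = '/'
      · subst hc
        have hstep : PySem.Chars.splitOn.go ['/'] (f + 1) ('/' :: rest) cur acc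
            = PySem.Chars.splitOn.go ['/'] f rest [] (cur.reverse :: acc) := by
          simp [PySem.Chars.splitOn.go, List.isPrefixOf]
        rw [hstep, ih rest [] _ (by simpa using h)]
        simp [pvPartsAux]
      · have hstep : PySem.Chars.splitOn.go ['/'] (f + 1) (c :: rest) cur acc
            = PySem.Chars.splitOn.go ['/'] f rest (c :: cur) acc := by
          simp [PySem.Chars.splitOn.go, List.isPrefixOf, Ne.symm hc]
        rw [hstep, ih rest (c :: cur) acc (by simpa using h)]
        simp [pvPartsAux, hc]

theorem pvSplitOn_eq (l : List Char) : PySem.Chars.splitOn l ['/'] = pvPartsAux [] l := by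
  unfold PySem.Chars.splitOn
  rw [pvGo_eq (l.length + 1) l [] [] (by omega)]
  simp

theorem pvL2 : ∀ (rel : List Char) (cur : List Char),
    pvPrefixJoins (pvPartsAux cur rel) = (pvSlashCuts rel ++ [rel]).map (cur.reverse ++ ·) := by
  intro rel
  induction rel with
  | nil => intro cur; simp [pvPartsAux, pvSlashCuts, pvPrefixJoins]
  | cons c cs ih =>
    intro cur
    by_cases hc : c = '/'
    · subst hc
      rw [show pvPartsAux cur ('/' :: cs) = cur.reverse :: pvPartsAux [] cs from by simp [pvPartsAux]]
      simp [pvPrefixJoins, ih [], pvSlashCuts, List.map_map, Function.comp_def]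
    · simp only [pvPartsAux, pvSlashCuts, if_neg hc, ih (c :: cur)]
      simp [List.map_map, Function.comp_def, List.append_assoc]

theorem pvFoldA : ∀ (ps : List (List Char)) (cur : String) (acc : List String),
    ((ps.map String.ofList).foldl (fun (st : String × List String) part =>
        let current := if st.1 ≠ "" then st.1 ++ "/" ++ part else "/" ++ part
        (current, st.2 ++ [current])) (cur, acc)).2
    = acc ++ (pvPrefixJoins ps).map (fun q => cur ++ "/" ++ String.ofList q) := by
  intro ps
  induction ps with
  | nil => intro cur acc; simp [pvPrefixJoins]
  | cons p ps ih =>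
    intro cur acc
    have hcur : (if cur ≠ "" then cur ++ "/" ++ String.ofList p else "/" ++ String.ofList p)
        = cur ++ "/" ++ String.ofList p := by
      by_cases h : cur = ""
      · subst h; simp
      · rw [if_pos h]
    simp only [List.map_cons, List.foldl_cons, hcur, ih, pvPrefixJoins, List.map_cons]
    simp only [List.map_map, List.append_assoc, List.singleton_append]
    congr 2
    apply List.map_congr_left
    intro q _
    simp only [Function.comp_apply]
    apply String.toList_inj.mp
    simp

theorem pvStrSliceTake (s : String) (n : Nat) :
    PySem.Str.slice s none (some (n : Int)) = String.ofList (s.toList.take n) := by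
  apply String.toList_inj.mp
  simp [PySem.List.slice_to_natCast]

theorem pvEnumCuts (rel : String) (base : String) : ∀ (t pre : List Char), pre ++ t = rel.toList →
    (PySem.List.enumerate t (pre.length : Int)).filterMap
        (fun p => if p.2 = '/' then some (base ++ "/" ++ PySem.Str.slice rel none (some p.1)) else none)
    = (pvSlashCuts t).map (fun q => base ++ "/" ++ String.ofList (pre ++ q)) := by
  intro t
  induction t with
  | nil => intro pre _; simp [PySem.List.enumerate, pvSlashCuts]
  | cons c t ih =>
    intro pre hpre
    rw [PySem.List.enumerate_cons]
    have hsucc : (pre.length : Int) + 1 = ((pre ++ [c]).length : Int) := by simp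
    have htail := ih (pre ++ [c]) (by simpa [List.append_assoc] using hpre)
    rw [hsucc] at *
    simp only [List.filterMap_cons, htail]
    have hslice : PySem.Str.slice rel none (some (pre.length : Int)) = String.ofList pre := by
      rw [pvStrSliceTake rel pre.length, ← hpre, List.take_left]
    by_cases hc : c = '/'
    · subst hc
      simp only [hslice, pvSlashCuts, reduceIte]
      simp [List.map_map, Function.comp_def, List.append_assoc]
    · simp only [pvSlashCuts, if_neg hc]
      simp [List.map_map, Function.comp_def, List.append_assoc]

theorem pvMain (base rel : String) :
    ((((PySem.Chars.splitOn rel.toList ['/']).map String.ofList).foldl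
        (fun (st : String × List String) part =>
          let current := if st.1 ≠ "" then st.1 ++ "/" ++ part else "/" ++ part
          (current, st.2 ++ [current])) (base, [])).2)
    = (PySem.List.enumerate rel.toList).filterMap
        (fun p => if p.2 = '/' then some (base ++ "/" ++ PySem.Str.slice rel none (some p.1)) else none)
      ++ [base ++ "/" ++ rel] := by
  rw [pvFoldA, pvSplitOn_eq, pvL2]
  have hB := pvEnumCuts rel base rel.toList [] (by simp)
  simp only [List.length_nil, Int.natCast_zero] at hB
  rw [hB]
  simp

-- ===== VERDICT (by name: the statement is the Claim_ definition above) =====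
theorem get_path_segments_py_spec : Claim_equal_get_path_segments_py := by
  intro parent_path child_path _
  show get_path_segments_py parent_path child_path = get_path_segments_py_alt parent_path child_path
  unfold get_path_segments_py get_path_segments_py_alt
  cases h : PySem.Str.startswith child_path (if parent_path = "/" then "" else parent_path) with
  | false => simp only [h, Bool.not_false, if_true]
  | true =>
    simp only [h, Bool.not_true]
    simp only [Bool.false_eq_true, if_false]
    exact pvMain _ _
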